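-- pv_equiv track=rewrite | github.com/Simone-Albero/idspy | src/idspy/builtins/step/nn/torch/log/tensorboard.py | _get_layer_name
-- ===== SOURCE A (Python) =====
-- def _get_layer_name(param_name: str) -> str:
--     """Extract layer name from parameter name (remove .weight, .bias suffixes)."""
--     # Remove common parameter suffixes
--     for suffix in [
--         ".weight",
--         ".bias",
--         ".running_mean",
--         ".running_var",
--         ".num_batches_tracked",
--     ]:
--         if param_name.endswith(suffix):
--             return param_name[: -len(suffix)]
--     return param_name
-- ===== SOURCE B (Python) =====
-- _PARAM_SUFFIXES = frozenset(
--     {"weight", "bias", "running_mean", "running_var", "num_batches_tracked"}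
-- )
--
--
-- def _get_layer_name(param_name: str) -> str:
--     """Extract layer name from parameter name (remove .weight, .bias suffixes)."""
--     head, sep, tail = param_name.rpartition(".")
--     if sep and tail in _PARAM_SUFFIXES:
--         return head
--     return param_name
-- ===== Notes on version B (the rewrite author's own statement) =====
-- stated objective: simpler
-- what changed: The loop over five endswith checks with slicing is replaced by a single rpartition at the last dot plus one set-membership test on the final component, returning the partition head directly.
import Mathlib
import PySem

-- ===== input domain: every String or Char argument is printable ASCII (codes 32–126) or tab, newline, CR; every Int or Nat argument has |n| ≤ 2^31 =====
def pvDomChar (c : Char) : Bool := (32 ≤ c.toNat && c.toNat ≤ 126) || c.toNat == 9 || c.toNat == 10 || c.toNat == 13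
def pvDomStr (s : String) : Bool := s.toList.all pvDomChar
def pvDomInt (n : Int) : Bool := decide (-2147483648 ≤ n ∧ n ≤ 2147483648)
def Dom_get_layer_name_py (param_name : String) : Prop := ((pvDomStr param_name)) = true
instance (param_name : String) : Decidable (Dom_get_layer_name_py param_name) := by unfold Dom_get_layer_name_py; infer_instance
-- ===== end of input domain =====

-- B replaces A's loop of five endswith checks by one rpartition at the last dot plus a set-membership
-- test on the final component (objective: simpler).

-- ===== PORT A =====
-- the 'for suffix in [...]' loop with early return
def getLayerNameLoop (param_name : String) : List String → String
  | [] => param_name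
  | suffix :: rest =>
      if PySem.Str.endswith param_name suffix then
        PySem.Str.slice param_name none (some (-(PySem.Str.len suffix : Int)))
      else getLayerNameLoop param_name rest

def get_layer_name_py (param_name : String) : String :=
  getLayerNameLoop param_name
    [".weight", ".bias", ".running_mean", ".running_var", ".num_batches_tracked"]

-- ===== PORT B =====
def pvParamSuffixes : PySem.Set String :=
  PySem.Set.ofList ["weight", "bias", "running_mean", "running_var", "num_batches_tracked"]

-- exact port of str.rpartition(sep) for the one-character separator ".":
-- the highest occurrence via rfind, then the two slices around it
def pvRPartitionDot (s : String) : String × String × String :=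
  let i := PySem.Str.rfind s "."
  if i < 0 then ("", "", s)
  else (PySem.Str.slice s none (some i), ".", PySem.Str.slice s (some (i + 1)) none)

def get_layer_name_py_alt (param_name : String) : String :=
  let p := pvRPartitionDot param_name
  if p.2.1 ≠ "" ∧ p.2.2 ∈ pvParamSuffixes then p.1 else param_name

-- ===== PRECONDITION & SPEC =====
def Spec_get_layer_name_py (param_name : String) (out : String) : Prop := out = get_layer_name_py_alt param_name
instance (param_name : String) (out : String) : Decidable (Spec_get_layer_name_py param_name out) := by unfold Spec_get_layer_name_py; infer_instance

-- ===== CLAIM (what is proved, stated in full; the proofs are below) =====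
def Claim_equal_get_layer_name_py : Prop := ∀ (param_name : String), Dom_get_layer_name_py param_name → Spec_get_layer_name_py param_name (get_layer_name_py param_name)

-- ===== LEMMAS AND PROOFS =====

-- [c].isPrefixOf l says exactly that l starts with c
theorem singleton_isPrefixOf_iff (c : Char) (l : List Char) :
    [c].isPrefixOf l = true ↔ l[0]? = some c := by
  rw [List.isPrefixOf_iff_prefix]
  constructor
  · rintro ⟨t, rfl⟩; rfl
  · intro h
    cases l with
    | nil => simp at h
    | cons a t => simp_all

-- spec of PySem.Chars.rfind.go for a singleton pattern
theorem rfind_go_spec (s : List Char) (c : Char) : ∀ j : Nat,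
    (PySem.Chars.rfind.go s [c] j = -1 ∧ ∀ i, i ≤ j → s[i]? ≠ some c)
    ∨ (∃ i : Nat, i ≤ j ∧ PySem.Chars.rfind.go s [c] j = (i : Int) ∧
        s[i]? = some c ∧ ∀ k, i < k → k ≤ j → s[k]? ≠ some c) := by
  intro j
  induction j with
  | zero =>
      by_cases h : [c].isPrefixOf s = true
      · right
        exact ⟨0, le_refl 0, by simp [PySem.Chars.rfind.go, h],
          (singleton_isPrefixOf_iff c s).mp h, by omega⟩
      · left
        refine ⟨by simp [PySem.Chars.rfind.go, h], ?_⟩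
        intro i hi
        interval_cases i
        intro hc
        exact h ((singleton_isPrefixOf_iff c s).mpr hc)
  | succ j ih =>
      by_cases h : [c].isPrefixOf (s.drop (j + 1)) = true
      · right
        have h0 : (s.drop (j + 1))[0]? = some c := (singleton_isPrefixOf_iff c _).mp h
        refine ⟨j + 1, le_refl _, by simp [PySem.Chars.rfind.go, h], ?_, by omega⟩
        simpa using h0
      · have hne : s[(j + 1)]? ≠ some c := by
          intro hc
          apply h
          rw [singleton_isPrefixOf_iff]
          simpa using hc
        have hgo : PySem.Chars.rfind.go s [c] (j + 1) = PySem.Chars.rfind.go s [c] j := by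
          simp [PySem.Chars.rfind.go, h]
        rcases ih with ⟨he, hall⟩ | ⟨i, hij, he, hc, hmax⟩
        · left
          refine ⟨by rw [hgo]; exact he, ?_⟩
          intro i hi
          rcases Nat.lt_or_ge i (j + 1) with hlt | hge
          · exact hall i (by omega)
          · have : i = j + 1 := by omega
            subst this; exact hne
        · right
          refine ⟨i, by omega, by rw [hgo]; exact he, hc, ?_⟩
          intro k hik hk
          rcases Nat.lt_or_ge k (j + 1) with hlt | hge
          · exact hmax k hik (by omega)
          · have : k = j + 1 := by omega
            subst this; exact hne

theorem rfind_spec (s : List Char) (c : Char) :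
    (PySem.Chars.rfind s [c] = -1 ∧ ∀ i : Nat, s[i]? ≠ some c)
    ∨ (∃ i : Nat, i < s.length ∧ PySem.Chars.rfind s [c] = (i : Int) ∧
        s[i]? = some c ∧ ∀ k, i < k → s[k]? ≠ some c) := by
  rcases rfind_go_spec s c s.length with ⟨he, hall⟩ | ⟨i, hij, he, hc, hmax⟩
  · left
    refine ⟨he, ?_⟩
    intro i
    rcases Nat.lt_or_ge i s.length with h | h
    · exact hall i (by omega)
    · simp [List.getElem?_eq_none h]
  · right
    have hi : i < s.length := by
      by_contra hge
      rw [List.getElem?_eq_none (by omega)] at hc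
      simp at hc
    refine ⟨i, hi, he, hc, ?_⟩
    intro k hik
    rcases Nat.lt_or_ge k s.length with h | h
    · exact hmax k hik (by omega)
    · simp [List.getElem?_eq_none h]

-- if the last dot of L sits at index i and w is dot-free, then '.'::w is a suffix of L
-- exactly when w is everything after index i
theorem suffix_iff_tail_eq (L : List Char) (i : Nat) (hi : i < L.length)
    (hdot : L[i]? = some '.') (hlast : ∀ k, i < k → L[k]? ≠ some '.')
    (w : List Char) (hw : '.' ∉ w) :
    ('.' :: w) <:+ L ↔ L.drop (i + 1) = w := by
  constructor
  · rintro ⟨u, hu⟩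
    have hulen : u.length + (w.length + 1) = L.length := by
      have := congrArg List.length hu
      simpa using this
    have hudot : L[u.length]? = some '.' := by
      rw [← hu]
      simp
    have hule : u.length ≤ i := by
      by_contra hgt
      exact hlast u.length (by omega) hudot
    have heq : u.length = i := by
      by_contra hne
      have hlt : u.length < i := by omega
      -- then L[i] lies inside w, contradicting hw
      have : L[i]? = w[(i - u.length - 1)]? := by
        rw [← hu, List.getElem?_append_right (by omega)]
        have : i - u.length = (i - u.length - 1) + 1 := by omega
        rw [this]
        simp
      rw [hdot] at this
      have hmem : '.' ∈ w := by
        have hwi : w[(i - u.length - 1)]? = some '.' := this.symm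
        exact List.mem_of_getElem? hwi
      exact hw hmem
    rw [← hu, heq.symm]
    simp
  · intro h
    refine ⟨L.take i, ?_⟩
    have hcons : L.drop i = '.' :: L.drop (i + 1) := by
      have := List.getElem?_eq_some_iff.mp hdot
      rcases this with ⟨h1, h2⟩
      rw [List.drop_eq_getElem_cons hi]
      simp [h2]
    rw [h] at hcons
    rw [← hcons]
    exact List.take_append_drop i L

-- no dot in s: s ends with none of the dotted suffixes
theorem endswith_false_of_no_dot (s suffix : String)
    (hs : ∀ i : Nat, s.toList[i]? ≠ some '.') (hd : '.' ∈ suffix.toList) :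
    PySem.Str.endswith s suffix = false := by
  rw [Bool.eq_false_iff]
  intro h
  rw [PySem.Str.endswith_eq, PySem.Chars.endswith_iff] at h
  rcases h with ⟨u, hu⟩
  have hmem : '.' ∈ s.toList := by
    rw [← hu]
    exact List.mem_append.mpr (Or.inr hd)
  rcases List.mem_iff_getElem?.mp hmem with ⟨j, hj⟩
  exact hs j hj

-- with the last dot at index i, s ends with '.'::w (w dot-free) iff w is everything after i
theorem endswith_iff_tail (s suffix : String) (w : List Char) (i : Nat)
    (hi : i < s.toList.length) (hdot : s.toList[i]? = some '.')
    (hlast : ∀ k, i < k → s.toList[k]? ≠ some '.')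
    (hsuf : suffix.toList = '.' :: w) (hw : '.' ∉ w) :
    PySem.Str.endswith s suffix = true ↔ s.toList.drop (i + 1) = w := by
  rw [PySem.Str.endswith_eq, PySem.Chars.endswith_iff, hsuf]
  exact suffix_iff_tail_eq s.toList i hi hdot hlast w hw

-- when the suffix matches, A's negative-length slice is B's head slice
theorem strip_slice_eq (s suffix : String) (w : List Char) (i : Nat)
    (hi : i < s.toList.length) (hsuf : suffix.toList = '.' :: w)
    (ht : s.toList.drop (i + 1) = w) :
    PySem.Str.slice s none (some (-(PySem.Str.len suffix : Int))) =
      PySem.Str.slice s none (some (i : Int)) := by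
  apply String.toList_inj.mp
  have hklen : suffix.toList.length = 1 + w.length := by
    rw [hsuf]; simp; omega
  have hk : PySem.Str.len suffix = ((1 + w.length : Nat) : Int) := by
    rw [PySem.Str.len_eq, hklen]
  have hlen : s.toList.length = i + (1 + w.length) := by
    have h := congrArg List.length ht
    rw [List.length_drop] at h
    omega
  rw [PySem.Str.toList_slice, PySem.Str.toList_slice,
    PySem.Chars.slice_eq_listSlice, PySem.Chars.slice_eq_listSlice, hk,
    PySem.List.slice_to_neg_natCast _ (1 + w.length) (by omega), PySem.List.slice_to _ (by omega)]
  congr 1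
  omega

-- the single-character rfind of B's rpartition
theorem rfind_dot_eq (s : String) : PySem.Str.rfind s "." = PySem.Chars.rfind s.toList ['.'] := rfl

-- membership of B's tail string in the suffix set, read off its character list
theorem mem_suffixes_iff (t : String) (L : List Char) (htail : t.toList = L) :
    (t ∈ pvParamSuffixes) ↔ (L = "weight".toList ∨ L = "bias".toList ∨
      L = "running_mean".toList ∨ L = "running_var".toList ∨
      L = "num_batches_tracked".toList) := by
  unfold pvParamSuffixes
  rw [PySem.Set.mem_ofList]
  simp only [List.mem_cons, List.not_mem_nil, or_false]
  constructor
  · rintro (h | h | h | h | h) <;>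
      (have h2 := congrArg String.toList h; rw [htail] at h2; tauto)
  · rintro (h | h | h | h | h) <;>
      (have h2 : t.toList = _ := htail.trans h) <;>
      (have h3 := String.toList_inj.mp h2; tauto)

set_option maxHeartbeats 1000000 in
theorem main_eq (s : String) : get_layer_name_py s = get_layer_name_py_alt s := by
  rcases rfind_spec s.toList '.' with ⟨hneg, hnodot⟩ | ⟨i, hi, hfind, hdot, hlast⟩
  · -- no dot anywhere: both sides return s unchanged
    have hB : get_layer_name_py_alt s = s := by
      unfold get_layer_name_py_alt pvRPartitionDot
      rw [rfind_dot_eq, hneg]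
      norm_num
    rw [hB]
    have hw1 := endswith_false_of_no_dot s ".weight" hnodot (by decide)
    have hw2 := endswith_false_of_no_dot s ".bias" hnodot (by decide)
    have hw3 := endswith_false_of_no_dot s ".running_mean" hnodot (by decide)
    have hw4 := endswith_false_of_no_dot s ".running_var" hnodot (by decide)
    have hw5 := endswith_false_of_no_dot s ".num_batches_tracked" hnodot (by decide)
    simp at hw1 hw2 hw3 hw4 hw5
    simp [get_layer_name_py, getLayerNameLoop, hw1, hw2, hw3, hw4, hw5]
  · -- the last dot sits at index i
    have htail : (PySem.Str.slice s (some ((i : Int) + 1)) none).toList = s.toList.drop (i + 1) := by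
      rw [PySem.Str.toList_slice, PySem.Chars.slice_eq_listSlice,
        show ((i : Int) + 1) = ((i + 1 : Nat) : Int) from by push_cast; ring,
        PySem.List.slice_from _ (by omega)]
      norm_num
    have hmem := mem_suffixes_iff (PySem.Str.slice s (some ((i : Int) + 1)) none) _ htail
    have hBpos : (s.toList.drop (i + 1) = "weight".toList ∨ s.toList.drop (i + 1) = "bias".toList ∨
        s.toList.drop (i + 1) = "running_mean".toList ∨ s.toList.drop (i + 1) = "running_var".toList ∨
        s.toList.drop (i + 1) = "num_batches_tracked".toList) →
        get_layer_name_py_alt s = PySem.Str.slice s none (some (i : Int)) := by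
      intro hd
      unfold get_layer_name_py_alt pvRPartitionDot
      simp only [rfind_dot_eq, hfind]
      rw [if_neg (show ¬((i : Int) < 0) by omega),
        if_pos (⟨by decide, hmem.mpr hd⟩ : ("." : String) ≠ "" ∧ _)]
    have hBneg : ¬(s.toList.drop (i + 1) = "weight".toList ∨ s.toList.drop (i + 1) = "bias".toList ∨
        s.toList.drop (i + 1) = "running_mean".toList ∨ s.toList.drop (i + 1) = "running_var".toList ∨
        s.toList.drop (i + 1) = "num_batches_tracked".toList) →
        get_layer_name_py_alt s = s := by
      intro hd
      unfold get_layer_name_py_alt pvRPartitionDot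
      simp only [rfind_dot_eq, hfind]
      rw [if_neg (show ¬((i : Int) < 0) by omega),
        if_neg (fun hc => hd (hmem.mp hc.2))]
    simp only [get_layer_name_py, getLayerNameLoop]
    have ew := endswith_iff_tail s ".weight" "weight".toList i hi hdot hlast (by decide) (by decide)
    have eb := endswith_iff_tail s ".bias" "bias".toList i hi hdot hlast (by decide) (by decide)
    have em := endswith_iff_tail s ".running_mean" "running_mean".toList i hi hdot hlast (by decide) (by decide)
    have ev := endswith_iff_tail s ".running_var" "running_var".toList i hi hdot hlast (by decide) (by decide)
    have en := endswith_iff_tail s ".num_batches_tracked" "num_batches_tracked".toList i hi hdot hlast (by decide) (by decide)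
    by_cases h1 : s.toList.drop (i + 1) = "weight".toList
    · rw [if_pos (ew.mpr h1), hBpos (Or.inl h1)]
      exact strip_slice_eq s ".weight" "weight".toList i hi (by decide) h1
    · rw [if_neg (by rw [ew]; exact h1)]
      by_cases h2 : s.toList.drop (i + 1) = "bias".toList
      · rw [if_pos (eb.mpr h2), hBpos (Or.inr (Or.inl h2))]
        exact strip_slice_eq s ".bias" "bias".toList i hi (by decide) h2
      · rw [if_neg (by rw [eb]; exact h2)]
        by_cases h3 : s.toList.drop (i + 1) = "running_mean".toList
        · rw [if_pos (em.mpr h3), hBpos (Or.inr (Or.inr (Or.inl h3)))]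
          exact strip_slice_eq s ".running_mean" "running_mean".toList i hi (by decide) h3
        · rw [if_neg (by rw [em]; exact h3)]
          by_cases h4 : s.toList.drop (i + 1) = "running_var".toList
          · rw [if_pos (ev.mpr h4), hBpos (Or.inr (Or.inr (Or.inr (Or.inl h4))))]
            exact strip_slice_eq s ".running_var" "running_var".toList i hi (by decide) h4
          · rw [if_neg (by rw [ev]; exact h4)]
            by_cases h5 : s.toList.drop (i + 1) = "num_batches_tracked".toList
            · rw [if_pos (en.mpr h5), hBpos (Or.inr (Or.inr (Or.inr (Or.inr h5))))]
              exact strip_slice_eq s ".num_batches_tracked" "num_batches_tracked".toList i hi (by decide) h5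
            · rw [if_neg (by rw [en]; exact h5), hBneg (by rintro (h | h | h | h | h) <;> [exact h1 h; exact h2 h; exact h3 h; exact h4 h; exact h5 h])]

-- ===== VERDICT (by name: the statement is the Claim_ definition above) =====
theorem get_layer_name_py_spec : Claim_equal_get_layer_name_py := by
  intro s _
  unfold Spec_get_layer_name_py
  exact main_eq s
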